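-- pv_equiv track=rewrite | github.com/bonyuta0204/make_ten | Py-CBoard.py | make_adjacent
-- ===== SOURCE A (Python) =====
-- WALL = -1
--
-- def make_adjacent(TABLE_SIZE):
--     adjacent = [[0] * 4 for i in range(TABLE_SIZE ** 2)]
--     # すべてのマスに対して
--
--     for i in range(TABLE_SIZE ** 2):
--         adjacent[i][0] = i - TABLE_SIZE
--         adjacent[i][1] = i - 1
--         adjacent[i][2] = i + 1
--         adjacent[i][3] = i + TABLE_SIZE
--     # 一列目から上を削除
--     for i in range(TABLE_SIZE):
--         adjacent[i][0] = WALL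
--     # 一番下の行から下を削除
--     for i in range(TABLE_SIZE * (TABLE_SIZE - 1), TABLE_SIZE * TABLE_SIZE):
--         adjacent[i][3] = WALL
--     # 左の列から左を削除
--     for i in range(TABLE_SIZE):
--         adjacent[i * TABLE_SIZE][1] = WALL
--     # 右の列から右を削除
--     for i in range(TABLE_SIZE):
--         adjacent[(i + 1) * TABLE_SIZE - 1][2] = WALL
--
--     return adjacent
-- ===== SOURCE B (Python) =====
-- WALL = -1
--
-- def make_adjacent(TABLE_SIZE):
--     # shift-and-zip: build the four neighbour COLUMNS as whole lists
--     # (up/down by shifting the id list by one row, left/right by shifting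
--     # each row by one cell), then zip them into the per-cell rows
--     n = TABLE_SIZE
--     ids = list(range(n * n))
--     up = [WALL] * n + ids[:n * (n - 1)]
--     down = ids[n:] + [WALL] * n
--     left = []
--     right = []
--     for r in range(n):
--         row = ids[r * n:(r + 1) * n]
--         left += [WALL] + row[:-1]
--         right += row[1:] + [WALL]
--     return [list(t) for t in zip(up, left, right, down)]
-- ===== Notes on version B (the rewrite author's own statement) =====
-- stated objective: alternative
-- what changed: Replaces A's fill-then-patch structure (allocate the table, write all four neighbours of every cell, then four border-patch loops) by a shift-and-zip algorithm: the four neighbour columns are built as whole lists (up/down by shifting the id list by one row, left/right by shifting each row by one cell, padding with WALL) and then zipped into the per-cell rows.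
-- outside the precondition, e.g. on make_adjacent(-1): A returns [[1, -1, 1, -1]], B returns []
import Mathlib
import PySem

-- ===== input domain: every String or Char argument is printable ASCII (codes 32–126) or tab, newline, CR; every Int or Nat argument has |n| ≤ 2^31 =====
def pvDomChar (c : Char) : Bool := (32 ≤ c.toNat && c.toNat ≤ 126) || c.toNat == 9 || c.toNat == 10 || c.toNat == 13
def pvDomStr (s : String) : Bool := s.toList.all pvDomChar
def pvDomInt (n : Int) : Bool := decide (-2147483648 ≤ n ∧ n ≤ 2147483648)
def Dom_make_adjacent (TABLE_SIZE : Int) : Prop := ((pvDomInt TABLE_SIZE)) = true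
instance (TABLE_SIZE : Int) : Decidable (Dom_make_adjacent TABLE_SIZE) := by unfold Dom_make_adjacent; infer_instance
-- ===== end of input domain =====

-- B replaces A's fill-then-patch-borders structure by a shift-and-zip algorithm: it builds
-- the four neighbour COLUMNS as whole lists (up/down by shifting the id list by one row,
-- left/right by shifting each row by one cell) and zips them (objective: alternative).

-- ===== PORT A =====
-- adjacent[i][j] = v  (Python item assignment on the nested list)
def pvModify (a : List (List Int)) (i : Int) (j : Int) (v : Int) : List (List Int) :=
  PySem.List.pySetD a i (PySem.List.pySetD (PySem.List.pyGetD a i []) j v)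

def make_adjacent (TABLE_SIZE : Int) : List (List Int) :=
  let adjacent := (PySem.List.pyRange 0 (TABLE_SIZE ^ 2) 1).map (fun _ => [0, 0, 0, 0])
  let adjacent := (PySem.List.pyRange 0 (TABLE_SIZE ^ 2) 1).foldl (fun a i =>
    let a := pvModify a i 0 (i - TABLE_SIZE)
    let a := pvModify a i 1 (i - 1)
    let a := pvModify a i 2 (i + 1)
    pvModify a i 3 (i + TABLE_SIZE)) adjacent
  let adjacent := (PySem.List.pyRange 0 TABLE_SIZE 1).foldl
    (fun a i => pvModify a i 0 (-1)) adjacent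
  let adjacent := (PySem.List.pyRange (TABLE_SIZE * (TABLE_SIZE - 1)) (TABLE_SIZE * TABLE_SIZE) 1).foldl
    (fun a i => pvModify a i 3 (-1)) adjacent
  let adjacent := (PySem.List.pyRange 0 TABLE_SIZE 1).foldl
    (fun a i => pvModify a (i * TABLE_SIZE) 1 (-1)) adjacent
  let adjacent := (PySem.List.pyRange 0 TABLE_SIZE 1).foldl
    (fun a i => pvModify a ((i + 1) * TABLE_SIZE - 1) 2 (-1)) adjacent
  adjacent

-- ===== PORT B =====
-- [list(t) for t in zip(a, b, c, d)]: zip truncates at the shortest list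
def pvZip4 : List Int → List Int → List Int → List Int → List (List Int)
  | a :: as, b :: bs, c :: cs, d :: ds => [a, b, c, d] :: pvZip4 as bs cs ds
  | _, _, _, _ => []

def make_adjacent_alt (TABLE_SIZE : Int) : List (List Int) :=
  let n := TABLE_SIZE
  let ids := PySem.List.pyRange 0 (n * n) 1
  let up := List.replicate n.toNat (-1) ++ PySem.List.slice ids none (some (n * (n - 1)))
  let down := PySem.List.slice ids (some n) none ++ List.replicate n.toNat (-1)
  let lr := (PySem.List.pyRange 0 n 1).foldl (fun (p : List Int × List Int) r =>
      let row := PySem.List.slice ids (some (r * n)) (some ((r + 1) * n))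
      (p.1 ++ (-1 :: PySem.List.slice row none (some (-1))),
       p.2 ++ (PySem.List.slice row (some 1) none ++ [-1]))) ([], [])
  pvZip4 up lr.1 lr.2 down

-- ===== PRECONDITION & SPEC =====
-- Pre_ restricts to the natural domain of a grid size: negative TABLE_SIZE is excluded —
-- there A still returns a full square table of rows but all four border-patch loops are silently
-- empty (range of a negative bound is empty), an artefact of the implementation, while
-- B's shifted columns come out empty.
def Pre_make_adjacent (TABLE_SIZE : Int) : Prop := 0 ≤ TABLE_SIZE
instance (TABLE_SIZE : Int) : Decidable (Pre_make_adjacent TABLE_SIZE) := by unfold Pre_make_adjacent; infer_instance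
def pvWitness_make_adjacent : Int := 3

def Spec_make_adjacent (TABLE_SIZE : Int) (out : List (List Int)) : Prop := out = make_adjacent_alt TABLE_SIZE
instance (TABLE_SIZE : Int) (out : List (List Int)) : Decidable (Spec_make_adjacent TABLE_SIZE out) := by unfold Spec_make_adjacent; infer_instance

-- ===== CLAIM (what is proved, stated in full; the proofs are below) =====
def Claim_equal_make_adjacent : Prop := ∀ (TABLE_SIZE : Int), Dom_make_adjacent TABLE_SIZE → Pre_make_adjacent TABLE_SIZE → Spec_make_adjacent TABLE_SIZE (make_adjacent TABLE_SIZE)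

-- ===== LEMMAS AND PROOFS =====

-- the common closed form both programs are reduced to: row k of the table, by formula
def pvM (n : Int) : List (List Int) :=
  (PySem.List.pyRange 0 (n * n) 1).map (fun k =>
    [if PySem.Int.floordiv k n = 0 then -1 else k - n,
     if PySem.Int.mod k n = 0 then -1 else k - 1,
     if PySem.Int.mod k n = n - 1 then -1 else k + 1,
     if PySem.Int.floordiv k n = n - 1 then -1 else k + n])

-- ---- A-side machinery (fill-then-patch folds rewritten as maps) ----

-- setting the four slots of a 4-element row in order rewrites the whole row
lemma pv_set4 (row : List Int) (h : row.length = 4) (v0 v1 v2 v3 : Int) :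
    (((row.set 0 v0).set 1 v1).set 2 v2).set 3 v3 = [v0, v1, v2, v3] := by
  rcases row with _ | ⟨a, _ | ⟨b, _ | ⟨c, _ | ⟨d, _ | e⟩⟩⟩⟩ <;> simp_all [List.set]

-- one item assignment on a range-indexed map
lemma pv_modify_map (n t j v : Int) (f : Int → List Int)
    (h0 : 0 ≤ t) (h1 : t < n) :
    pvModify ((PySem.List.pyRange 0 n 1).map f) t j v
      = (PySem.List.pyRange 0 n 1).map (fun k => if k = t then PySem.List.pySetD (f k) j v else f k) := by
  unfold pvModify
  rw [PySem.List.pyGetD_map_pyRange_of_nonneg f n t [] h0 h1,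
      PySem.List.pySetD_of_nonneg _ _ h0]
  apply List.ext_getElem
  · simp
  · intro m hm1 hm2
    simp only [List.getElem_set, List.getElem_map, PySem.List.getElem_pyRange_one, zero_add]
    have hm : m < (n - 0).toNat := by simpa [PySem.List.length_pyRange_one] using hm1
    by_cases he : (m : Int) = t
    · have h2 : t.toNat = m := by omega
      rw [if_pos h2, if_pos he, he]
    · have h2 : ¬ t.toNat = m := by omega
      rw [if_neg h2, if_neg he]

-- a patch loop: setting slot j to v at targets g i, i ∈ idx
lemma pv_patch_fold (idx : List Int) (g : Int → Int) (n : Int) (j v : Int) (f : Int → List Int)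
    (hj : 0 ≤ j) (h : ∀ i ∈ idx, 0 ≤ g i ∧ g i < n) :
    idx.foldl (fun a i => pvModify a (g i) j v) ((PySem.List.pyRange 0 n 1).map f)
      = (PySem.List.pyRange 0 n 1).map
          (fun k => if ∃ i ∈ idx, g i = k then PySem.List.pySetD (f k) j v else f k) := by
  have dd : ∀ r : List Int,
      PySem.List.pySetD (PySem.List.pySetD r j v) j v = PySem.List.pySetD r j v := by
    intro r
    simp [PySem.List.pySetD_of_nonneg _ _ hj, List.set_set]
  induction idx generalizing f with
  | nil => simp
  | cons a idx ih =>
    rw [List.foldl_cons,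
        pv_modify_map n (g a) j v f (h a List.mem_cons_self).1 (h a List.mem_cons_self).2,
        ih _ (fun i hi => h i (List.mem_cons_of_mem a hi))]
    apply List.map_congr_left
    intro k _
    have hcons : (∃ i ∈ a :: idx, g i = k) ↔ (k = g a ∨ ∃ i ∈ idx, g i = k) := by
      constructor
      · rintro ⟨i, hi, hgi⟩
        rcases List.mem_cons.mp hi with rfl | hi'
        · exact Or.inl hgi.symm
        · exact Or.inr ⟨i, hi', hgi⟩
      · rintro (hk | ⟨i, hi, hgi⟩)
        · exact ⟨a, List.mem_cons_self, hk.symm⟩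
        · exact ⟨i, List.mem_cons_of_mem a hi, hgi⟩
    by_cases h2 : ∃ i ∈ idx, g i = k
    · rw [if_pos h2, if_pos (hcons.mpr (Or.inr h2))]
      by_cases h1 : k = g a
      · rw [if_pos h1]; exact dd _
      · rw [if_neg h1]
    · rw [if_neg h2]
      by_cases h1 : k = g a
      · rw [if_pos h1, if_pos (hcons.mpr (Or.inl h1))]
      · rw [if_neg h1, if_neg (fun hc => (hcons.mp hc).elim h1 h2)]

-- the fill loop: writing all four slots of row i, for every i ∈ idx
lemma pv_fill_fold (idx : List Int) (n : Int) (v0 v1 v2 v3 : Int → Int) (f : Int → List Int)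
    (h : ∀ i ∈ idx, 0 ≤ i ∧ i < n) (hlen : ∀ k, (f k).length = 4) :
    idx.foldl (fun a i =>
        let a := pvModify a i 0 (v0 i)
        let a := pvModify a i 1 (v1 i)
        let a := pvModify a i 2 (v2 i)
        pvModify a i 3 (v3 i)) ((PySem.List.pyRange 0 n 1).map f)
      = (PySem.List.pyRange 0 n 1).map
          (fun k => if ∃ i ∈ idx, i = k then [v0 k, v1 k, v2 k, v3 k] else f k) := by
  induction idx generalizing f with
  | nil => simp
  | cons a idx ih =>
    have ha0 := (h a List.mem_cons_self).1
    have ha1 := (h a List.mem_cons_self).2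
    rw [List.foldl_cons]
    have hstep : (let x := pvModify ((PySem.List.pyRange 0 n 1).map f) a 0 (v0 a);
                  let x := pvModify x a 1 (v1 a);
                  let x := pvModify x a 2 (v2 a);
                  pvModify x a 3 (v3 a))
        = (PySem.List.pyRange 0 n 1).map (fun k => if k = a then [v0 a, v1 a, v2 a, v3 a] else f k) := by
      simp only
      rw [pv_modify_map n a 0 (v0 a) f ha0 ha1,
          pv_modify_map n a 1 (v1 a) _ ha0 ha1,
          pv_modify_map n a 2 (v2 a) _ ha0 ha1,
          pv_modify_map n a 3 (v3 a) _ ha0 ha1]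
      apply List.map_congr_left
      intro k _
      by_cases hk : k = a
      · subst hk
        rw [PySem.List.pySetD_of_nonneg _ _ (by norm_num),
            PySem.List.pySetD_of_nonneg _ _ (by norm_num),
            PySem.List.pySetD_of_nonneg _ _ (by norm_num),
            PySem.List.pySetD_of_nonneg _ _ (by norm_num)]
        simpa using pv_set4 (f k) (hlen k) (v0 k) (v1 k) (v2 k) (v3 k)
      · simp [hk]
    rw [hstep, ih _ (fun i hi => h i (List.mem_cons_of_mem a hi))
          (fun k => by by_cases hk : k = a <;> simp [hk, hlen k])]
    apply List.map_congr_left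
    intro k _
    have hcons : (∃ i ∈ a :: idx, i = k) ↔ (k = a ∨ ∃ i ∈ idx, i = k) := by
      constructor
      · rintro ⟨i, hi, hgi⟩
        rcases List.mem_cons.mp hi with rfl | hi'
        · exact Or.inl hgi.symm
        · exact Or.inr ⟨i, hi', hgi⟩
      · rintro (hk | ⟨i, hi, hgi⟩)
        · exact ⟨a, List.mem_cons_self, hk.symm⟩
        · exact ⟨i, List.mem_cons_of_mem a hi, hgi⟩
    by_cases h2 : ∃ i ∈ idx, i = k
    · rw [if_pos h2, if_pos (hcons.mpr (Or.inr h2))]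
    · rw [if_neg h2]
      by_cases h1 : k = a
      · rw [if_pos h1, if_pos (hcons.mpr (Or.inl h1)), h1]
      · rw [if_neg h1, if_neg (fun hc => (hcons.mp hc).elim h1 h2)]

-- Python item assignment on an explicit 4-row, one lemma per slot
lemma pv_setD0 (a b c d v : Int) : PySem.List.pySetD [a,b,c,d] 0 v = [v,b,c,d] := rfl
lemma pv_setD1 (a b c d v : Int) : PySem.List.pySetD [a,b,c,d] 1 v = [a,v,c,d] := rfl
lemma pv_setD2 (a b c d v : Int) : PySem.List.pySetD [a,b,c,d] 2 v = [a,b,v,d] := rfl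
lemma pv_setD3 (a b c d v : Int) : PySem.List.pySetD [a,b,c,d] 3 v = [a,b,c,v] := rfl

-- A reduces to the closed form
lemma pvA_eq (TS : Int) (hpre : 0 ≤ TS) : make_adjacent TS = pvM TS := by
  unfold make_adjacent pvM
  rw [show TS ^ 2 = TS * TS from sq TS]
  dsimp only
  have hfill : ∀ i ∈ PySem.List.pyRange 0 (TS * TS) 1, 0 ≤ i ∧ i < TS * TS :=
    fun i hi => PySem.List.mem_pyRange_one.mp hi
  have htop : ∀ i ∈ PySem.List.pyRange 0 TS 1, 0 ≤ i ∧ i < TS * TS := by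
    intro i hi
    have h := PySem.List.mem_pyRange_one.mp hi
    exact ⟨h.1, by nlinarith [h.1, h.2]⟩
  have hbot : ∀ i ∈ PySem.List.pyRange (TS * (TS - 1)) (TS * TS) 1, 0 ≤ i ∧ i < TS * TS := by
    intro i hi
    have h := PySem.List.mem_pyRange_one.mp hi
    exact ⟨by nlinarith [h.1, h.2, hpre], by nlinarith [h.1, h.2]⟩
  have hleft : ∀ i ∈ PySem.List.pyRange 0 TS 1, 0 ≤ i * TS ∧ i * TS < TS * TS := by
    intro i hi
    have h := PySem.List.mem_pyRange_one.mp hi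
    exact ⟨by nlinarith [h.1, h.2, hpre], by nlinarith [h.1, h.2, hpre]⟩
  have hright : ∀ i ∈ PySem.List.pyRange 0 TS 1,
      0 ≤ (i + 1) * TS - 1 ∧ (i + 1) * TS - 1 < TS * TS := by
    intro i hi
    have h := PySem.List.mem_pyRange_one.mp hi
    exact ⟨by nlinarith [h.1, h.2, hpre], by nlinarith [h.1, h.2, hpre]⟩
  rw [pv_fill_fold (PySem.List.pyRange 0 (TS * TS) 1) (TS * TS)
        (fun i => i - TS) (fun i => i - 1) (fun i => i + 1) (fun i => i + TS)
        (fun _ => [0, 0, 0, 0]) hfill (fun _ => rfl),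
      pv_patch_fold (PySem.List.pyRange 0 TS 1) (fun i => i) (TS * TS) 0 (-1) _
        (by norm_num) htop,
      pv_patch_fold (PySem.List.pyRange (TS * (TS - 1)) (TS * TS) 1) (fun i => i) (TS * TS) 3 (-1) _
        (by norm_num) hbot,
      pv_patch_fold (PySem.List.pyRange 0 TS 1) (fun i => i * TS) (TS * TS) 1 (-1) _
        (by norm_num) hleft,
      pv_patch_fold (PySem.List.pyRange 0 TS 1) (fun i => (i + 1) * TS - 1) (TS * TS) 2 (-1) _
        (by norm_num) hright]
  apply List.map_congr_left
  intro k hk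
  have hkk := PySem.List.mem_pyRange_one.mp hk
  have hpre' : (0 : Int) ≤ TS := hpre
  have hTS : 0 < TS := by
    rcases hpre'.lt_or_eq with h | h
    · exact h
    · exfalso; rw [← h] at hkk; norm_num at hkk; omega
  have hC0 : ∃ i ∈ PySem.List.pyRange 0 (TS * TS) 1, i = k := ⟨k, hk, rfl⟩
  have hTop : (∃ i ∈ PySem.List.pyRange 0 TS 1, i = k) ↔ PySem.Int.floordiv k TS = 0 := by
    rw [PySem.Int.floordiv_eq_iff_of_pos hTS]
    simp [PySem.List.mem_pyRange_one]
  have hBot : (∃ i ∈ PySem.List.pyRange (TS * (TS - 1)) (TS * TS) 1, i = k)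
      ↔ PySem.Int.floordiv k TS = TS - 1 := by
    rw [PySem.Int.floordiv_eq_iff_of_pos hTS]
    simp only [PySem.List.mem_pyRange_one, exists_eq_right]
    constructor
    · rintro ⟨h1, h2⟩; exact ⟨by nlinarith, by nlinarith⟩
    · rintro ⟨h1, h2⟩; exact ⟨by nlinarith, by nlinarith⟩
  have hLeft : (∃ i ∈ PySem.List.pyRange 0 TS 1, i * TS = k) ↔ PySem.Int.mod k TS = 0 := by
    constructor
    · rintro ⟨i, hi, rfl⟩
      rw [PySem.Int.mod_eq_zero_iff_dvd]
      exact dvd_mul_left TS i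
    · intro hm
      refine ⟨PySem.Int.floordiv k TS, ?_, ?_⟩
      · rw [PySem.List.mem_pyRange_one]
        constructor
        · rw [PySem.Int.le_floordiv_iff_mul_le hTS]; linarith [hkk.1]
        · rw [PySem.Int.floordiv_lt_iff_lt_mul hTS]; nlinarith [hkk.2]
      · have := PySem.Int.floordiv_mul_add_mod k TS
        linarith
  have hRight : (∃ i ∈ PySem.List.pyRange 0 TS 1, (i + 1) * TS - 1 = k)
      ↔ PySem.Int.mod k TS = TS - 1 := by
    constructor
    · rintro ⟨i, hi, rfl⟩
      rw [PySem.Int.mod_eq_emod_of_pos hTS, show (i + 1) * TS - 1 = (TS - 1) + i * TS by ring,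
          Int.add_mul_emod_self_right, Int.emod_eq_of_lt (by omega) (by omega)]
    · intro hm
      refine ⟨PySem.Int.floordiv k TS, ?_, ?_⟩
      · rw [PySem.List.mem_pyRange_one]
        constructor
        · rw [PySem.Int.le_floordiv_iff_mul_le hTS]; linarith [hkk.1]
        · rw [PySem.Int.floordiv_lt_iff_lt_mul hTS]; nlinarith [hkk.2]
      · have := PySem.Int.floordiv_mul_add_mod k TS
        linarith
  rw [if_pos hC0]
  simp only [hTop, hBot, hLeft, hRight]
  by_cases hTS1 : TS = 1
  · subst hTS1
    have hk0 : k = 0 := by omega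
    subst hk0
    decide
  · have hne1 : ¬((0 : Int) = TS - 1) := by omega
    have hne2 : ¬(TS - 1 = (0 : Int)) := by omega
    by_cases ht : PySem.Int.floordiv k TS = 0 <;>
      by_cases hb : PySem.Int.floordiv k TS = TS - 1 <;>
        by_cases hl : PySem.Int.mod k TS = 0 <;>
          by_cases hr : PySem.Int.mod k TS = TS - 1 <;>
            first
              | (rw [ht] at hb; exact absurd hb hne1)
              | (rw [hl] at hr; exact absurd hr hne1)
              | simp [ht, hb, hl, hr, hne1, hne2, pv_setD0, pv_setD1, pv_setD2, pv_setD3]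

-- ---- B-side machinery (shifted columns are maps over the id range) ----

-- range splitting, shifting, trimming
lemma pv_range_split (a b c : Int) (hab : a ≤ b) (hbc : b ≤ c) :
    PySem.List.pyRange a c 1 = PySem.List.pyRange a b 1 ++ PySem.List.pyRange b c 1 := by
  apply List.ext_getElem
  · simp [PySem.List.length_pyRange_one]; omega
  · intro m h1 h2
    rw [PySem.List.getElem_pyRange_one]
    rw [List.getElem_append]
    split_ifs with h
    · rw [PySem.List.getElem_pyRange_one]
    · rw [PySem.List.getElem_pyRange_one]
      simp [PySem.List.length_pyRange_one] at h ⊢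
      omega

lemma pv_slice_range (a b c : Int) (h0 : 0 ≤ a) (hab : a ≤ b) (hbc : b ≤ c) :
    PySem.List.slice (PySem.List.pyRange 0 c 1) (some a) (some b) = PySem.List.pyRange a b 1 := by
  rw [PySem.List.slice_toNat _ h0 (le_trans h0 hab)]
  apply List.ext_getElem
  · simp [PySem.List.length_pyRange_one]; omega
  · intro m h1 h2
    rw [List.getElem_take, List.getElem_drop, PySem.List.getElem_pyRange_one,
        PySem.List.getElem_pyRange_one]
    simp [PySem.List.length_pyRange_one] at h1 h2
    omega

lemma pv_range_shift (a b d : Int) :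
    (PySem.List.pyRange a b 1).map (fun k => k + d) = PySem.List.pyRange (a + d) (b + d) 1 := by
  apply List.ext_getElem
  · simp [PySem.List.length_pyRange_one]
  · intro m h1 h2
    simp [PySem.List.getElem_pyRange_one]
    ring

lemma pv_range_dropLast (a b : Int) :
    (PySem.List.pyRange a b 1).dropLast = PySem.List.pyRange a (b - 1) 1 := by
  apply List.ext_getElem
  · simp [PySem.List.length_pyRange_one]; omega
  · intro m h1 h2
    rw [List.getElem_dropLast, PySem.List.getElem_pyRange_one, PySem.List.getElem_pyRange_one]

lemma pv_range_tail (a b : Int) :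
    (PySem.List.pyRange a b 1).tail = PySem.List.pyRange (a + 1) b 1 := by
  apply List.ext_getElem
  · simp [PySem.List.length_pyRange_one]; omega
  · intro m h1 h2
    rw [List.getElem_tail, PySem.List.getElem_pyRange_one, PySem.List.getElem_pyRange_one]
    omega

lemma pv_zip4_map (xs : List Int) (f1 f2 f3 f4 : Int → Int) :
    pvZip4 (xs.map f1) (xs.map f2) (xs.map f3) (xs.map f4)
      = xs.map (fun x => [f1 x, f2 x, f3 x, f4 x]) := by
  induction xs with
  | nil => rfl
  | cons x xs ih => simp [pvZip4, ih]

lemma pv_up (n : Int) (hn : 0 < n) :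
    List.replicate n.toNat (-1) ++ PySem.List.slice (PySem.List.pyRange 0 (n*n) 1) none (some (n*(n-1)))
    = (PySem.List.pyRange 0 (n*n) 1).map (fun k => if PySem.Int.floordiv k n = 0 then -1 else k - n) := by
  rw [PySem.List.slice_to _ (by nlinarith)]
  have e1 : (n*(n-1)).toNat = (n*n).toNat - n.toNat := by
    have h1 : n*(n-1) = n*n - n := by ring
    have h2 : 0 ≤ n*n - n := by nlinarith
    rw [h1]
    generalize hg : n*n = u at h2 ⊢
    omega
  have e2 : n.toNat ≤ (n*n).toNat := Int.toNat_le_toNat (by nlinarith)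
  apply List.ext_getElem
  · simp [PySem.List.length_pyRange_one, e1]
    omega
  · intro m h1 h2
    have hm : m < (n*n).toNat := by
      simpa [PySem.List.length_pyRange_one] using h2
    have hmi : (m:Int) < n*n := by
      have hnn : ((n*n).toNat : Int) = n*n := Int.toNat_of_nonneg (by nlinarith)
      rw [← hnn]; exact_mod_cast hm
    rw [List.getElem_map, PySem.List.getElem_pyRange_one]
    by_cases h : m < n.toNat
    · rw [List.getElem_append_left (by simpa using h), List.getElem_replicate]
      have hc : PySem.Int.floordiv (0 + (m:Int)) n = 0 := by
        rw [PySem.Int.floordiv_eq_iff_of_pos hn]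
        constructor
        · nlinarith
        · have : (m:Int) < n := by omega
          linarith
      rw [if_pos hc]
    · rw [List.getElem_append_right (by simpa using h)]
      simp only [List.getElem_take, List.length_replicate]
      rw [PySem.List.getElem_pyRange_one]
      have hc : ¬ PySem.Int.floordiv (0 + (m:Int)) n = 0 := by
        rw [PySem.Int.floordiv_eq_iff_of_pos hn]
        rintro ⟨-, hb⟩
        have : (m:Int) < n := by linarith
        omega
      rw [if_neg hc]
      omega

lemma pv_down (n : Int) (hn : 0 < n) :
    PySem.List.slice (PySem.List.pyRange 0 (n*n) 1) (some n) none ++ List.replicate n.toNat (-1)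
    = (PySem.List.pyRange 0 (n*n) 1).map (fun k => if PySem.Int.floordiv k n = n - 1 then -1 else k + n) := by
  rw [PySem.List.slice_from _ (le_of_lt hn)]
  have e2 : n.toNat ≤ (n*n).toNat := Int.toNat_le_toNat (by nlinarith)
  have hnn : ((n*n).toNat : Int) = n*n := Int.toNat_of_nonneg (by positivity)
  have hni : ((n.toNat) : Int) = n := Int.toNat_of_nonneg hn.le
  apply List.ext_getElem
  · simp [PySem.List.length_pyRange_one]
    omega
  · intro m h1 h2
    have hm : m < (n*n).toNat := by
      simpa [PySem.List.length_pyRange_one] using h2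
    have hmi : (m:Int) < n*n := by
      rw [← hnn]; exact_mod_cast hm
    rw [List.getElem_map, PySem.List.getElem_pyRange_one]
    by_cases h : m < (n*n).toNat - n.toNat
    · rw [List.getElem_append_left (by simp [PySem.List.length_pyRange_one]; omega),
          List.getElem_drop, PySem.List.getElem_pyRange_one]
      have hmlt : (m:Int) < n*n - n := by
        have : ((m:Int)) < ((n*n).toNat : Int) - (n.toNat : Int) := by exact_mod_cast (by omega : m < (n*n).toNat - n.toNat)
        omega
      have hc : ¬ PySem.Int.floordiv (0 + (m:Int)) n = n - 1 := by
        rw [PySem.Int.floordiv_eq_iff_of_pos hn]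
        rintro ⟨ha, -⟩
        nlinarith
      rw [if_neg hc]
      push_cast
      omega
    · rw [List.getElem_append_right (by simp [PySem.List.length_pyRange_one]; omega),
          List.getElem_replicate]
      have hmge : n*n - n ≤ (m:Int) := by
        have : ((n*n).toNat : Int) - (n.toNat : Int) ≤ (m:Int) := by exact_mod_cast (by omega : ((n*n).toNat - n.toNat : Int) ≤ m)
        omega
      have hc : PySem.Int.floordiv (0 + (m:Int)) n = n - 1 := by
        rw [PySem.Int.floordiv_eq_iff_of_pos hn]
        constructor
        · nlinarith
        · nlinarith
      rw [if_pos hc]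

-- the left/right loop: after m rows it has built the two shifted columns up to m*n
lemma pv_lr (n : Int) (hn : 0 < n) : ∀ m : Nat, (m : Int) ≤ n →
    (PySem.List.pyRange 0 (m : Int) 1).foldl (fun (p : List Int × List Int) r =>
      let row := PySem.List.slice (PySem.List.pyRange 0 (n*n) 1) (some (r * n)) (some ((r + 1) * n))
      (p.1 ++ (-1 :: PySem.List.slice row none (some (-1))),
       p.2 ++ (PySem.List.slice row (some 1) none ++ [-1]))) ([], [])
    = ((PySem.List.pyRange 0 ((m:Int)*n) 1).map (fun k => if PySem.Int.mod k n = 0 then -1 else k - 1),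
       (PySem.List.pyRange 0 ((m:Int)*n) 1).map (fun k => if PySem.Int.mod k n = n - 1 then -1 else k + 1)) := by
  intro m
  induction m with
  | zero => intro _; norm_num [PySem.List.pyRange_one]
  | succ m ih =>
    intro hm1
    have hmn : (m:Int) < n := by push_cast at hm1; omega
    have hc : ((m:Int)+1)*n = (m:Int)*n + n := by ring
    have hmle : ((m:Int)+1) ≤ n := by push_cast at hm1; omega
    have hcle : ((m:Int)+1)*n ≤ n*n := mul_le_mul_of_nonneg_right hmle hn.le
    have hsplit : PySem.List.pyRange 0 ((m+1 : Nat) : Int) 1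
        = PySem.List.pyRange 0 (m:Int) 1 ++ PySem.List.pyRange (m:Int) ((m+1 : Nat) : Int) 1 :=
      pv_range_split _ _ _ (by positivity) (by push_cast; omega)
    have hsingle : PySem.List.pyRange ((m:Int)) (((m+1 : Nat)) : Int) 1 = [((m:Int))] := by
      rw [PySem.List.pyRange_one]
      push_cast
      norm_num
    rw [hsplit, hsingle, List.foldl_append, ih (le_of_lt hmn), List.foldl_cons, List.foldl_nil]
    have hrow : PySem.List.slice (PySem.List.pyRange 0 (n*n) 1) (some ((m:Int) * n)) (some (((m:Int) + 1) * n))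
        = PySem.List.pyRange ((m:Int)*n) (((m:Int)+1)*n) 1 :=
      pv_slice_range _ _ _ (by positivity) (by nlinarith) hcle
    simp only [hrow, PySem.List.slice_to_neg_one, pv_range_dropLast, PySem.List.slice_from_one,
      pv_range_tail, Prod.mk.injEq]
    have hmod : ∀ k : Int, (m:Int)*n + 1 ≤ k → k < ((m:Int)+1)*n →
        PySem.Int.mod k n = k - (m:Int)*n := by
      intro k hk1 hk2
      rw [PySem.Int.mod_eq_emod_of_pos hn, show k = (k - (m:Int)*n) + (m:Int) * n by ring,
          Int.add_mul_emod_self_right, Int.emod_eq_of_lt (by linarith) (by linarith [hc])]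
      ring
    have hmm : ((m+1 : Nat) : Int) * n = ((m:Int)+1)*n := by push_cast; ring
    constructor
    · have hblock : List.map (fun k => if PySem.Int.mod k n = 0 then -1 else k - 1)
          (PySem.List.pyRange ((m:Int)*n) (((m:Int)+1)*n) 1)
          = -1 :: PySem.List.pyRange ((m:Int)*n) (((m:Int)+1)*n - 1) 1 := by
        rw [PySem.List.pyRange_one_cons (by nlinarith), List.map_cons,
            List.map_congr_left (g := fun k => k - 1) (by
              intro k hk
              have hb := PySem.List.mem_pyRange_one.mp hk
              rw [hmod k hb.1 hb.2]
              rw [if_neg (by intro hz; linarith [hb.1])])]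
        congr 1
        · rw [if_pos (PySem.Int.mod_eq_zero_iff_dvd _ _ |>.mpr (dvd_mul_left n (m:Int)))]
        · simp only [sub_eq_add_neg]
          rw [pv_range_shift]
          congr 1
          ring
      rw [hmm, pv_range_split 0 ((m:Int)*n) (((m:Int)+1)*n) (by positivity) (by nlinarith),
          List.map_append, hblock]
    · have hblock : List.map (fun k => if PySem.Int.mod k n = n - 1 then -1 else k + 1)
          (PySem.List.pyRange ((m:Int)*n) (((m:Int)+1)*n) 1)
          = PySem.List.pyRange ((m:Int)*n + 1) (((m:Int)+1)*n) 1 ++ [-1] := by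
        have hpeel : PySem.List.pyRange ((m:Int)*n) (((m:Int)+1)*n) 1
            = PySem.List.pyRange ((m:Int)*n) (((m:Int)+1)*n - 1) 1 ++ [((m:Int)+1)*n - 1] := by
          rw [pv_range_split ((m:Int)*n) (((m:Int)+1)*n - 1) (((m:Int)+1)*n)
                (by linarith [hc]) (by linarith)]
          congr 1
          rw [PySem.List.pyRange_one]
          norm_num
        rw [hpeel, List.map_append, List.map_singleton,
            List.map_congr_left (g := fun k => k + 1) (by
              intro k hk
              have hb := PySem.List.mem_pyRange_one.mp hk
              by_cases he : k = (m:Int)*n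
              · subst he
                rw [PySem.Int.mod_eq_zero_iff_dvd _ _ |>.mpr (dvd_mul_left n (m:Int)),
                    if_neg (by omega)]
              · rw [hmod k (Int.lt_iff_add_one_le.mp (lt_of_le_of_ne hb.1 (Ne.symm he))) (by linarith [hc]),
                    if_neg (by intro hz; linarith [hb.2, hc])])]
        congr 1
        · rw [pv_range_shift]
          congr 1
          ring
        · rw [if_pos (by
            rw [PySem.Int.mod_eq_emod_of_pos hn,
                show ((m:Int)+1)*n - 1 = (n - 1) + (m:Int) * n by ring,
                Int.add_mul_emod_self_right, Int.emod_eq_of_lt (by omega) (by omega)])]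
      rw [hmm, pv_range_split 0 ((m:Int)*n) (((m:Int)+1)*n) (by positivity) (by nlinarith),
          List.map_append, hblock]

-- B reduces to the closed form
lemma pvB_eq (TS : Int) (hpre : 0 ≤ TS) : make_adjacent_alt TS = pvM TS := by
  rcases eq_or_lt_of_le hpre with h0 | hn
  · rw [← h0]
    decide
  · unfold make_adjacent_alt pvM
    dsimp only
    have hm := pv_lr TS hn TS.toNat (by rw [Int.toNat_of_nonneg hpre])
    rw [Int.toNat_of_nonneg hpre] at hm
    rw [hm, pv_up TS hn, pv_down TS hn, pv_zip4_map]

-- ===== VERDICT (by name: the statement is the Claim_ definition above) =====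
theorem make_adjacent_spec : Claim_equal_make_adjacent := by
  intro TS _ hpre
  unfold Spec_make_adjacent
  rw [pvA_eq TS hpre, pvB_eq TS hpre]
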